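-- pv_equiv track=rewrite | github.com/SVB-algorithm-study/JuniPark | HackerRank/Week2/MarsExploration/MarsExploration.py | marsExploration
-- ===== SOURCE A (Python) =====
-- def marsExploration(s):
--     # Write your code here
--     cnt = 0
--     for i in range(len(s)//3):
--         message = s[i*3:i*3+3]
--         if message != "SOS" :
--             if message[0] != "S" :
--                 cnt +=1
--             if message[1] != "O" :
--                 cnt +=1
--             if message[2] != "S" :
--                 cnt +=1
--
--     return cnt
-- ===== SOURCE B (Python) =====
-- def marsExploration(s):
--     pattern = "SOS" * (len(s) // 3)
--     return sum(1 for a, b in zip(s, pattern) if a != b)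
-- ===== Notes on version B (the rewrite author's own statement) =====
-- stated objective: simpler
-- what changed: B builds the expected repeating pattern string once and counts mismatches with a single zip, replacing A's indexed loop over 3-character slices with per-position if-chains.
import Mathlib
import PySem

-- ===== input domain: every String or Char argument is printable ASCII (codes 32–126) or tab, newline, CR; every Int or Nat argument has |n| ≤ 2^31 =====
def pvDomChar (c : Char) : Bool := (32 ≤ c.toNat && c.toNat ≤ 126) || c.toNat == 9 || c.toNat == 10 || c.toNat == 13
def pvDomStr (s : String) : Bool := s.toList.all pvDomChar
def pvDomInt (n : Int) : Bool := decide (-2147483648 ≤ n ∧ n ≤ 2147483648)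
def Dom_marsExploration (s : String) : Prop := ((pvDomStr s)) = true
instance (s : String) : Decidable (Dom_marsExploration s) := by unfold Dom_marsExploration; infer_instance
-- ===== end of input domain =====

-- B replaces A's indexed loop over 3-character slices by one zip against the
-- expected repeated 'SOS' pattern; same return value, similar cost (objective: simpler).

-- ===== PORT A =====
-- literal port of A: loop i in range(len(s)//3), slice out s[i*3:i*3+3], add one
-- per mismatching position (message[k] ported with pyGet?; always in range here)
def marsExploration (s : String) : Int :=
  (PySem.List.pyRange 0 (PySem.Int.floordiv (s.toList.length : Int) 3) 1).foldl
    (fun cnt i =>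
      let message := PySem.List.slice s.toList (some (i * 3)) (some (i * 3 + 3))
      if message ≠ ['S', 'O', 'S'] then
        let cnt := if PySem.List.pyGet? message 0 ≠ some 'S' then cnt + 1 else cnt
        let cnt := if PySem.List.pyGet? message 1 ≠ some 'O' then cnt + 1 else cnt
        if PySem.List.pyGet? message 2 ≠ some 'S' then cnt + 1 else cnt
      else cnt) 0

-- ===== PORT B =====
-- literal port of B: pattern = "SOS" * (len(s)//3); count mismatches in zip(s, pattern)
def marsExploration_alt (s : String) : Int :=
  let pattern := (List.replicate (s.toList.length / 3) ['S', 'O', 'S']).flatten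
  ((s.toList.zip pattern).countP (fun p => p.1 != p.2) : Int)

-- ===== PRECONDITION & SPEC =====
def Spec_marsExploration (s : String) (out : Int) : Prop := out = marsExploration_alt s
instance (s : String) (out : Int) : Decidable (Spec_marsExploration s out) := by unfold Spec_marsExploration; infer_instance

-- ===== CLAIM (what is proved, stated in full; the proofs are below) =====
def Claim_equal_marsExploration : Prop := ∀ (s : String), Dom_marsExploration s → Spec_marsExploration s (marsExploration s)

-- ===== LEMMAS AND PROOFS =====

-- per-chunk cost of A's loop body, started at 0
def chunkCost (l : List Char) (i : Int) : Int :=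
  let message := PySem.List.slice l (some (i * 3)) (some (i * 3 + 3))
  (if PySem.List.pyGet? message 0 ≠ some 'S' then 1 else 0)
  + (if PySem.List.pyGet? message 1 ≠ some 'O' then 1 else 0)
  + (if PySem.List.pyGet? message 2 ≠ some 'S' then 1 else 0)

theorem body_eq (l : List Char) (cnt i : Int) :
    (let message := PySem.List.slice l (some (i * 3)) (some (i * 3 + 3))
     if message ≠ ['S', 'O', 'S'] then
       let cnt := if PySem.List.pyGet? message 0 ≠ some 'S' then cnt + 1 else cnt
       let cnt := if PySem.List.pyGet? message 1 ≠ some 'O' then cnt + 1 else cnt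
       if PySem.List.pyGet? message 2 ≠ some 'S' then cnt + 1 else cnt
     else cnt) = cnt + chunkCost l i := by
  simp only [chunkCost]
  by_cases h : PySem.List.slice l (some (i * 3)) (some (i * 3 + 3)) = ['S', 'O', 'S']
  · simp [h, PySem.List.pyGet?, PySem.List.pyIdx?]
  · simp only [h, ne_eq, not_false_iff, if_true]
    split_ifs <;> ring

theorem chunk_eq_zip (a b c : Char) (rest : List Char) :
    chunkCost (a :: b :: c :: rest) 0
      = (((a :: b :: c :: rest).zip ['S', 'O', 'S']).countP (fun p => p.1 != p.2) : Int) := by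
  simp only [chunkCost, zero_mul, zero_add]
  rw [PySem.List.slice_toNat _ (by norm_num) (by norm_num)]
  simp [PySem.List.pyGet?, PySem.List.pyIdx?, List.countP_cons, bne_iff_ne]
  split_ifs <;> simp_all

theorem chunkCost_shift (l : List Char) (k : Nat) (i : Int) (hi : 0 ≤ i) :
    chunkCost l ((k : Int) + i) = chunkCost (l.drop (3 * k)) i := by
  have h3 : 0 ≤ i * 3 := by omega
  simp only [chunkCost]
  have hs : PySem.List.slice l (some (((k : Int) + i) * 3)) (some (((k : Int) + i) * 3 + 3))
      = PySem.List.slice (l.drop (3 * k)) (some (i * 3)) (some (i * 3 + 3)) := by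
    rw [PySem.List.slice_toNat _ (by omega) (by omega),
      PySem.List.slice_toNat _ h3 (by omega), List.drop_drop]
    congr 1
    · omega
    · congr 1
      omega
  rw [hs]

-- zip ignores the part of the longer list beyond the shorter one
theorem take_length_zip {α β : Type} (l : List α) (p : List β) (h : p.length ≤ l.length) :
    (l.take p.length).zip p = l.zip p := by
  induction p generalizing l with
  | nil => simp
  | cons x xs ih =>
    cases l with
    | nil => simp at h
    | cons y ys => simp_all [List.zip_cons_cons]

-- main loop invariant: the first n chunks of A's loop sum to B's zip count
theorem sum_chunks (n : Nat) (l : List Char) (h : 3 * n ≤ l.length) :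
    ((PySem.List.pyRange 0 (n : Int) 1).map (chunkCost l)).sum
      = ((l.zip ((List.replicate n (['S', 'O', 'S'] : List Char)).flatten)).countP
          (fun p => p.1 != p.2) : Int) := by
  induction n generalizing l with
  | zero => simp [PySem.List.pyRange_one_eq_nil]
  | succ n ih =>
    have hcast : ((n + 1 : Nat) : Int) = (n : Int) + 1 := by push_cast; ring
    rw [hcast, PySem.List.pyRange_one_succ_right (by positivity), List.map_append,
      List.sum_append, List.map_singleton, List.sum_singleton]
    have hlen : (List.replicate n (['S', 'O', 'S'] : List Char)).flatten.length = 3 * n := by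
      simp [List.length_flatten, List.map_replicate, Nat.mul_comm]
    have hsplit : l = l.take (3 * n) ++ l.drop (3 * n) := (List.take_append_drop _ _).symm
    have hzip : l.zip ((List.replicate (n + 1) (['S', 'O', 'S'] : List Char)).flatten)
        = (l.take (3 * n)).zip ((List.replicate n (['S', 'O', 'S'] : List Char)).flatten)
          ++ (l.drop (3 * n)).zip ['S', 'O', 'S'] := by
      conv_lhs => rw [hsplit]
      rw [List.replicate_succ', List.flatten_append]
      rw [List.zip_append (by simp [hlen]; omega)]
      simp
    rw [hzip, List.countP_append]
    have htake : ((l.take (3 * n)).zip ((List.replicate n (['S', 'O', 'S'] : List Char)).flatten))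
        = l.zip ((List.replicate n (['S', 'O', 'S'] : List Char)).flatten) := by
      rw [show 3 * n = (List.replicate n (['S', 'O', 'S'] : List Char)).flatten.length from hlen.symm]
      exact take_length_zip l _ (by rw [hlen]; omega)
    have hdrop : ∃ a b c rest, l.drop (3 * n) = a :: b :: c :: rest := by
      have : 3 ≤ (l.drop (3 * n)).length := by simp; omega
      match hd : l.drop (3 * n) with
      | a :: b :: c :: rest => exact ⟨a, b, c, rest, rfl⟩
      | [] | [_] | [_, _] => rw [hd] at this; simp at this
    obtain ⟨a, b, c, rest, hd⟩ := hdrop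
    have hlast : chunkCost l (n : Int) = chunkCost (l.drop (3 * n)) 0 := by
      have := chunkCost_shift l n 0 le_rfl
      simpa using this
    rw [ih l (by omega), htake, hlast, hd, chunk_eq_zip]
    push_cast
    ring

-- ===== VERDICT (by name: the statement is the Claim_ definition above) =====
theorem marsExploration_spec : Claim_equal_marsExploration := by
  intro s _
  unfold Spec_marsExploration marsExploration marsExploration_alt
  have hfun : (fun (cnt i : Int) =>
      let message := PySem.List.slice s.toList (some (i * 3)) (some (i * 3 + 3))
      if message ≠ ['S', 'O', 'S'] then
        let cnt := if PySem.List.pyGet? message 0 ≠ some 'S' then cnt + 1 else cnt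
        let cnt := if PySem.List.pyGet? message 1 ≠ some 'O' then cnt + 1 else cnt
        if PySem.List.pyGet? message 2 ≠ some 'S' then cnt + 1 else cnt
      else cnt) = fun cnt i => cnt + chunkCost s.toList i := by
    funext cnt i
    exact body_eq s.toList cnt i
  rw [show (PySem.Int.floordiv (s.toList.length : Int) 3)
        = ((s.toList.length / 3 : Nat) : Int) from PySem.Int.floordiv_natCast _ 3]
  rw [hfun, PySem.List.foldl_add, zero_add]
  rw [sum_chunks (s.toList.length / 3) s.toList (by omega)]
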